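-- pv_equiv track=rewrite | github.com/ALXS-GitHub/Programmer-La-Matiere | project/main.py | number_robot
-- ===== SOURCE A (Python) =====
-- def number_robot(data_position):
--
--     level = []
--     number_robot = []
--     for i in range(len(data_position)):
--         if data_position[i][2] > len(level):
--             for j in range(len(level) + 1, data_position[i][2] + 1):
--                 level.append(j)
--                 number_robot.append(0)
--
--         number_robot[data_position[i][2] - 1] += 1
--
--     return level, number_robot
-- ===== SOURCE B (Python) =====
-- def number_robot(data_position):
--     maxlevel = max((p[2] for p in data_position), default=0)
--     level = list(range(1, maxlevel + 1))
--     counts = [sum(1 for p in data_position if p[2] == lvl) for lvl in level]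
--     return level, counts
-- ===== Notes on version B (the rewrite author's own statement) =====
-- stated objective: alternative
-- what changed: Instead of growing a counts array and incrementing buckets in one mutating scan, B computes the maximum level once and then tallies each level independently with a per-level scan (a comprehension of generator sums) -- no mutable counts array at all; it trades O(n+m) for O(n*m).
-- outside the precondition, e.g. on number_robot([(0, 0, 1), (0, 0, 0), (0, 0, 2)]): A returns ([1, 2], [2, 1]), B returns ([1, 2], [1, 1]); on number_robot([(0, 0, 0)]): A raises IndexError, B returns ([], [])
import Mathlib
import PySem

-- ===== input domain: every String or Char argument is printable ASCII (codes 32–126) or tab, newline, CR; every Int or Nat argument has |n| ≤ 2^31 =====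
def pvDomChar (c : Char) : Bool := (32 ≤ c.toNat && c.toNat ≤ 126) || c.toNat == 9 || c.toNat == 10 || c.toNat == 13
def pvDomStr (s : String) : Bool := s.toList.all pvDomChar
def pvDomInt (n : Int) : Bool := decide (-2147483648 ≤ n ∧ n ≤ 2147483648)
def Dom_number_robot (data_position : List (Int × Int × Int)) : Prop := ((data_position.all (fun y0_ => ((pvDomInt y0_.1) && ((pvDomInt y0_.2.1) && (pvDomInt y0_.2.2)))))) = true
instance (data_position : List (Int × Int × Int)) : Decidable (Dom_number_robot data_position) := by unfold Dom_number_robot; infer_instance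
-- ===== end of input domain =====

-- B replaces A's grow-and-increment mutating scan by an independent per-level tally:
-- max level once, then one comprehension counting each level separately (objective: alternative; not faster).


-- ===== PORT A =====
-- number_robot[idx] += 1 with Python index semantics (in range under Pre_)
def pyInc (xs : List Int) (i : Int) : List Int :=
  PySem.List.pySetD xs i (PySem.List.pyGetD xs i 0 + 1)

-- body of A's inner extension loop: level.append(j); number_robot.append(0)
def stepExtA (st : List Int × List Int) (j : Int) : List Int × List Int :=
  (st.1 ++ [j], st.2 ++ [0])

-- body of A's outer loop over data_position
def stepA (st : List Int × List Int) (p : Int × Int × Int) : List Int × List Int :=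
  let st1 := if p.2.2 > (st.1.length : Int) then
      (PySem.List.pyRange ((st.1.length : Int) + 1) (p.2.2 + 1) 1).foldl stepExtA st
    else st
  (st1.1, pyInc st1.2 (p.2.2 - 1))

def number_robot (data_position : List (Int × Int × Int)) : List Int × List Int :=
  data_position.foldl stepA ([], [])

-- ===== PORT B =====
-- sum(1 for p in data_position if p[2] == lvl)
def countLvl (data_position : List (Int × Int × Int)) (lvl : Int) : Int :=
  data_position.foldl (fun a p => if p.2.2 = lvl then a + 1 else a) 0

def number_robot_alt (data_position : List (Int × Int × Int)) : List Int × List Int :=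
  let maxlevel : Int := match data_position.map (fun p => p.2.2) with
    | [] => 0
    | x :: xs => xs.foldl max x          -- max(..., default=0)
  let level := PySem.List.pyRange 1 (maxlevel + 1) 1
  (level, level.map (fun lvl => countLvl data_position lvl))

-- ===== PRECONDITION & SPEC =====
-- Pre_ restricts to the function's natural domain: every level is >= 1 (levels number the robot
-- layers from 1 up). On a nonpositive level no behaviour is specified and neither program's value is
-- the one to match: A raises IndexError when the counts list is still too short, and otherwise adds
-- the robot to a bucket picked by negative-index wraparound against the prefix-dependent list length,
-- while B simply tallies no bucket for it; see claim.json "cites" for one input of each kind.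
def Pre_number_robot (data_position : List (Int × Int × Int)) : Prop :=
  ∀ p ∈ data_position, 1 ≤ p.2.2
instance (data_position : List (Int × Int × Int)) : Decidable (Pre_number_robot data_position) := by
  unfold Pre_number_robot; infer_instance

def pvWitness_number_robot : (List (Int × Int × Int)) := [(0, 0, 1), (5, -2, 3), (1, 1, 1)]

def Spec_number_robot (data_position : List (Int × Int × Int)) (out : List Int × List Int) : Prop := out = number_robot_alt data_position
instance (data_position : List (Int × Int × Int)) (out : List Int × List Int) : Decidable (Spec_number_robot data_position out) := by unfold Spec_number_robot; infer_instance

-- ===== CLAIM =====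
def Claim_equal_number_robot : Prop := ∀ (data_position : List (Int × Int × Int)), Dom_number_robot data_position → Pre_number_robot data_position → Spec_number_robot data_position (number_robot data_position)

-- ===== LEMMAS AND PROOFS =====

-- running maximum of the levels, started at m
def Mof (m : Int) (l : List (Int × Int × Int)) : Int :=
  l.foldl (fun a p => max a p.2.2) m

theorem Mof_eq_foldl_max (m : Int) (l : List (Int × Int × Int)) :
    Mof m l = (l.map (fun p => p.2.2)).foldl max m := by
  simp [Mof, List.foldl_map]

theorem le_Mof (m : Int) (l : List (Int × Int × Int)) : m ≤ Mof m l := by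
  rw [Mof_eq_foldl_max]; exact (PySem.List.le_foldl_max _ _).1

theorem mem_le_Mof (m : Int) (l : List (Int × Int × Int)) :
    ∀ p ∈ l, p.2.2 ≤ Mof m l := by
  intro p hp
  rw [Mof_eq_foldl_max]
  exact (PySem.List.le_foldl_max _ _).2 _ (List.mem_map_of_mem hp)

theorem length_pyInc (xs : List Int) (i : Int) : (pyInc xs i).length = xs.length := by
  simp [pyInc, PySem.List.length_pySetD]

theorem getElem_pyInc (xs : List Int) (j : Int) (i : Nat) (hi : i < xs.length)
    (hlt : i < (pyInc xs j).length) (h0 : 0 ≤ j) (hj : j < (xs.length : Int)) :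
    (pyInc xs j)[i]'hlt = xs[i] + (if j = (i : Int) then 1 else 0) := by
  simp only [pyInc, PySem.List.pySetD_of_nonneg _ _ h0,
    PySem.List.pyGetD_eq_getElem _ _ h0 hj, List.getElem_set]
  by_cases h : j.toNat = i
  · simp [show j = (i : Int) by omega]
  · simp [if_neg h, show ¬ j = (i : Int) by omega]

-- B's per-level generator sum is a count
theorem countLvl_eq_countP (l : List (Int × Int × Int)) (lvl : Int) :
    countLvl l lvl = (l.countP (fun p => decide (p.2.2 = lvl)) : Int) := by
  simpa using PySem.List.foldl_ite_add_one (fun p => p.2.2 = lvl) l 0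

theorem length_foldl_stepB (l : List (Int × Int × Int)) :
    ∀ c : List Int, (l.foldl (fun c p => pyInc c (p.2.2 - 1)) c).length = c.length := by
  induction l with
  | nil => intro c; rfl
  | cons p t ih => intro c; rw [List.foldl_cons, ih, length_pyInc]

-- bucket i of the counting fold = starting value + number of elements at level i+1
theorem getElem?_foldl_stepB (l : List (Int × Int × Int)) :
    ∀ (cs : List Int) (i : Nat) (hi : i < cs.length),
    (∀ p ∈ l, 1 ≤ p.2.2 ∧ p.2.2 ≤ (cs.length : Int)) →
    (l.foldl (fun cs p => pyInc cs (p.2.2 - 1)) cs)[i]?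
      = some (cs[i] + (l.countP (fun p => decide (p.2.2 = (i : Int) + 1)) : Int)) := by
  induction l with
  | nil =>
      intro cs i hi _
      rw [List.foldl_nil, List.getElem?_eq_getElem hi]
      simp
  | cons p t ih =>
      intro cs i hi hall
      have hp := hall p (List.mem_cons_self ..)
      have hi' : i < (pyInc cs (p.2.2 - 1)).length := by rw [length_pyInc]; exact hi
      have hall' : ∀ q ∈ t, 1 ≤ q.2.2 ∧ q.2.2 ≤ ((pyInc cs (p.2.2 - 1)).length : Int) := by
        intro q hq; rw [length_pyInc]; exact hall q (List.mem_cons_of_mem _ hq)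
      rw [List.foldl_cons, ih (pyInc cs (p.2.2 - 1)) i hi' hall',
          getElem_pyInc cs (p.2.2 - 1) i hi hi' (by omega) (by omega), List.countP_cons]
      by_cases h : p.2.2 = (i : Int) + 1
      · rw [if_pos (show p.2.2 - 1 = (i : Int) by omega)]
        simp [h]; ring
      · rw [if_neg (show ¬ p.2.2 - 1 = (i : Int) by omega)]
        simp [h]

-- A's inner extension loop, from level = [1..m] and counts c, appends k fresh slots
theorem extA_spec (k : Nat) : ∀ (m : Int) (c : List Int), 0 ≤ m →
    (PySem.List.pyRange (m + 1) (m + (k : Int) + 1) 1).foldl stepExtA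
      (PySem.List.pyRange 1 (m + 1) 1, c)
    = (PySem.List.pyRange 1 (m + (k : Int) + 1) 1, c ++ List.replicate k 0) := by
  induction k with
  | zero =>
      intro m c hm
      rw [PySem.List.pyRange_one_eq_nil (show m + (0 : Nat) + 1 ≤ m + 1 by omega)]
      simp
  | succ k ih =>
      intro m c hm
      have h1 : m + ((k : Int) + 1) + 1 = (m + (k : Int) + 1) + 1 := by ring
      push_cast
      rw [h1, PySem.List.pyRange_one_succ_right (a := m + 1) (b := m + (k : Int) + 1) (by omega),
          PySem.List.pyRange_one_succ_right (a := 1) (b := m + (k : Int) + 1) (by omega),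
          List.foldl_append]
      rw [ih m c hm]
      simp [stepExtA, List.replicate_succ']

-- the main loop invariant: from level = [1..m], counts c of length m, A's fold equals
-- the flat counting fold on c padded with zeros up to the final maximum
theorem main_inv (l : List (Int × Int × Int)) : ∀ (m : Int) (c : List Int),
    (∀ p ∈ l, 1 ≤ p.2.2) → 0 ≤ m → c.length = m.toNat →
    l.foldl stepA (PySem.List.pyRange 1 (m + 1) 1, c)
    = (PySem.List.pyRange 1 (Mof m l + 1) 1,
       l.foldl (fun c p => pyInc c (p.2.2 - 1)) (c ++ List.replicate (Mof m l - m).toNat 0)) := by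
  induction l with
  | nil => intro m c _ hm hc; simp [Mof]
  | cons p t ih =>
      intro m c hall hm hc
      have he : 1 ≤ p.2.2 := hall p (List.mem_cons_self ..)
      have hall' : ∀ q ∈ t, 1 ≤ q.2.2 := fun q hq => hall q (List.mem_cons_of_mem _ hq)
      have hlen : ((PySem.List.pyRange 1 (m + 1) 1).length : Int) = m := by
        rw [PySem.List.length_pyRange_one]; omega
      have pyInc_append : ∀ (c d : List Int) (i : Int), 0 ≤ i → i < (c.length : Int) →
          pyInc (c ++ d) i = pyInc c i ++ d := by
        intro c d i h0 h
        have hn : i.toNat < c.length := by omega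
        simp [pyInc, PySem.List.pySetD_of_nonneg _ _ h0, PySem.List.pyGetD_of_nonneg _ _ h0,
              List.getD_eq_getElem?_getD, List.getElem?_append_left hn,
              List.set_append_left _ _ hn]
      rw [List.foldl_cons]
      by_cases hgt : p.2.2 > m
      · -- extension branch
        have hstep : stepA (PySem.List.pyRange 1 (m + 1) 1, c) p
            = (PySem.List.pyRange 1 (p.2.2 + 1) 1,
               pyInc (c ++ List.replicate (p.2.2 - m).toNat 0) (p.2.2 - 1)) := by
          have hk : m + ((p.2.2 - m).toNat : Int) = p.2.2 := by omega
          have := extA_spec (p.2.2 - m).toNat m c hm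
          rw [hk] at this
          simp only [stepA, hlen, if_pos hgt, this]
        rw [hstep]
        have hlen' : (pyInc (c ++ List.replicate (p.2.2 - m).toNat 0) (p.2.2 - 1)).length
            = p.2.2.toNat := by
          rw [length_pyInc, List.length_append, List.length_replicate]; omega
        rw [ih p.2.2 _ hall' (by omega) hlen']
        have hM : Mof m (p :: t) = Mof p.2.2 t := by
          simp only [Mof, List.foldl_cons]; congr 1; omega
        have hMe : p.2.2 ≤ Mof p.2.2 t := le_Mof _ _
        simp only [Prod.mk.injEq]
        refine ⟨by rw [hM], ?_⟩
        rw [hM, List.foldl_cons]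
        have hsplit : c ++ List.replicate (Mof p.2.2 t - m).toNat (0 : Int)
            = (c ++ List.replicate (p.2.2 - m).toNat 0)
              ++ List.replicate (Mof p.2.2 t - p.2.2).toNat 0 := by
          rw [List.append_assoc, ← List.replicate_add]
          congr 2; omega
        rw [hsplit]
        rw [pyInc_append (c ++ List.replicate (p.2.2 - m).toNat 0)
              (List.replicate (Mof p.2.2 t - p.2.2).toNat 0) (p.2.2 - 1) (by omega)
              (by rw [List.length_append, List.length_replicate]; omega)]
      · -- no extension
        have hstep : stepA (PySem.List.pyRange 1 (m + 1) 1, c) p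
            = (PySem.List.pyRange 1 (m + 1) 1, pyInc c (p.2.2 - 1)) := by
          simp only [stepA, hlen, if_neg hgt]
        rw [hstep, ih m _ hall' hm (by rw [length_pyInc]; exact hc)]
        have hM : Mof m (p :: t) = Mof m t := by
          simp only [Mof, List.foldl_cons]; congr 1; omega
        simp only [Prod.mk.injEq]
        refine ⟨by rw [hM], ?_⟩
        rw [hM, List.foldl_cons]
        rw [pyInc_append c (List.replicate (Mof m t - m).toNat 0) (p.2.2 - 1) (by omega)
              (by omega)]

-- the counting fold on an all-zero vector is exactly B's per-level tally
theorem foldl_stepB_eq_map (l : List (Int × Int × Int)) (M : Int) (hM : 0 ≤ M)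
    (hall : ∀ p ∈ l, 1 ≤ p.2.2 ∧ p.2.2 ≤ M) :
    l.foldl (fun c p => pyInc c (p.2.2 - 1)) (List.replicate M.toNat 0)
      = (PySem.List.pyRange 1 (M + 1) 1).map (fun lvl => countLvl l lvl) := by
  apply List.ext_getElem
  · rw [length_foldl_stepB, List.length_replicate, List.length_map,
        PySem.List.length_pyRange_one]
    omega
  · intro i h1 h2
    have hi : i < (List.replicate M.toNat (0 : Int)).length := by
      rw [length_foldl_stepB] at h1; exact h1
    have hq := getElem?_foldl_stepB l (List.replicate M.toNat 0) i hi
      (by intro p hp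
          refine ⟨(hall p hp).1, ?_⟩
          have := (hall p hp).2
          rw [List.length_replicate]
          omega)
    rw [List.getElem?_eq_getElem h1, Option.some.injEq] at hq
    rw [hq, List.getElem_map, PySem.List.getElem_pyRange_one, countLvl_eq_countP]
    have hc : (1 : Int) + (i : Int) = (i : Int) + 1 := by ring
    rw [hc]
    simp [List.getElem_replicate]

-- ===== VERDICT (by name: the statement is the Claim_ definition above) =====
theorem number_robot_spec : Claim_equal_number_robot := by
  intro l _ hpre
  unfold Spec_number_robot
  have hM0 : 0 ≤ Mof 0 l := le_Mof 0 l
  have h0 : number_robot l = l.foldl stepA (PySem.List.pyRange 1 (0 + 1) 1, []) := by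
    rw [number_robot]; rfl
  rw [h0, main_inv l 0 [] hpre le_rfl rfl]
  have hMb : (match l.map (fun p => p.2.2) with
      | [] => (0 : Int)
      | x :: xs => xs.foldl max x) = Mof 0 l := by
    cases l with
    | nil => rfl
    | cons q t =>
        simp only [List.map_cons, Mof, List.foldl_cons, List.foldl_map]
        congr 1
        have := hpre q (List.mem_cons_self ..)
        omega
  rw [number_robot_alt]
  simp only [hMb, Prod.mk.injEq]
  refine ⟨trivial, ?_⟩
  simp only [Int.sub_zero, List.nil_append]
  exact foldl_stepB_eq_map l (Mof 0 l) hM0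
    (fun p hp => ⟨hpre p hp, mem_le_Mof 0 l p hp⟩)
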